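-- pv_equiv track=rewrite | github.com/michael-130/Mcp-Daily-Tools | health_focus.py | _analyze_wellness_trends
-- ===== SOURCE A (Python) =====
-- from typing import Dict, List, Any, Optional
--
-- def _analyze_wellness_trends(wellness_data: List[Dict[str, Any]], metrics: List[str]) -> Dict[str, Any]:
--     """Analyze wellness trends over time
--
--     Args:
--         wellness_data (List[Dict[str, Any]]): Historical wellness data
--         metrics (List[str]): Metrics to analyze trends for
--
--     Returns:
--         Dict[str, Any]: Trend analysis results
--     """
--     trends = {}
--
--     for metric in metrics:
--         values = [data.get(metric, 0) for data in wellness_data if metric in data]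
--         if len(values) >= 2:
--             if values[-1] > values[0]:
--                 trends[metric] = "improving"
--             elif values[-1] < values[0]:
--                 trends[metric] = "declining"
--             else:
--                 trends[metric] = "stable"
--
--     return trends
-- ===== SOURCE B (Python) =====
-- def _analyze_wellness_trends(wellness_data, metrics):
--     """One pass over wellness_data collecting (first, last, count) per metric,
--     then one classification pass over metrics."""
--     stats = {}
--     for data in wellness_data:
--         for metric, value in data.items():
--             if metric in stats:
--                 first, _, count = stats[metric]
--                 stats[metric] = (first, value, count + 1)
--             else:
--                 stats[metric] = (value, value, 1)
--     trends = {}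
--     for metric in metrics:
--         if metric in stats:
--             first, last, count = stats[metric]
--             if count >= 2:
--                 if last > first:
--                     trends[metric] = "improving"
--                 elif last < first:
--                     trends[metric] = "declining"
--                 else:
--                     trends[metric] = "stable"
--     return trends
-- ===== Notes on version B (the rewrite author's own statement) =====
-- stated objective: faster
-- what changed: Instead of rescanning the whole wellness_data list once per metric, B makes a single pass over wellness_data building a dict of (first, last, count) per metric present, then classifies each requested metric from that summary.
import Mathlib
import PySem

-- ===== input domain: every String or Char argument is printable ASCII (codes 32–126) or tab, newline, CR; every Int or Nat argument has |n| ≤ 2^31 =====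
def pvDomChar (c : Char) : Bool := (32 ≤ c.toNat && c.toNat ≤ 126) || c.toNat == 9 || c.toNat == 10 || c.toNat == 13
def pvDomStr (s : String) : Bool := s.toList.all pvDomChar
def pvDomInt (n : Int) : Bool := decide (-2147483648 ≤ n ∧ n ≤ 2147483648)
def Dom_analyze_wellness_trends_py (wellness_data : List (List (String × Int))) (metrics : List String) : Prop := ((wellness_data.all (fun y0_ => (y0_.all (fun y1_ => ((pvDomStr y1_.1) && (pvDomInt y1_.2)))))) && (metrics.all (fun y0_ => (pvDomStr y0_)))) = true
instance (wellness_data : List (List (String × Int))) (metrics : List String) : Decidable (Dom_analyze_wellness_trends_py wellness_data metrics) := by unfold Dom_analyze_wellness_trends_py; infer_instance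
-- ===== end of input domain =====

-- B replaces A's per-metric rescan of wellness_data by a single pass collecting
-- (first, last, count) per metric followed by one classification pass (objective: faster, constant/asymptotic in M).

-- ===== PORT A =====
-- step of 'for metric in metrics' building trends
def pvAStep (wellness_data : List (List (String × Int))) (trends : PySem.Dict String String) (metric : String) : PySem.Dict String String :=
  let values : List Int :=
    ((wellness_data.filter (fun data => (PySem.Dict.mk data).contains metric)).map
      (fun data => (PySem.Dict.mk data).getD metric 0))
  if values.length ≥ 2 then
    let vlast := PySem.List.pyGetD values (-1) 0
    let vfirst := PySem.List.pyGetD values 0 0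
    if vlast > vfirst then trends.insert metric "improving"
    else if vlast < vfirst then trends.insert metric "declining"
    else trends.insert metric "stable"
  else trends

def analyze_wellness_trends_py (wellness_data : List (List (String × Int))) (metrics : List String) : List (String × String) :=
  (metrics.foldl (pvAStep wellness_data) PySem.Dict.empty).items

-- ===== PORT B =====
-- inner loop: 'for metric, value in data.items()' updating stats
def pvBRow (st : PySem.Dict String (Int × Int × Int)) (data : List (String × Int)) : PySem.Dict String (Int × Int × Int) :=
  data.foldl (fun st p =>
    match st.get? p.1 with
    | some (f, _, c) => st.insert p.1 (f, p.2, c + 1)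
    | none => st.insert p.1 (p.2, p.2, 1)) st

def pvStats (wellness_data : List (List (String × Int))) : PySem.Dict String (Int × Int × Int) :=
  wellness_data.foldl pvBRow PySem.Dict.empty

def pvBStep (stats : PySem.Dict String (Int × Int × Int)) (trends : PySem.Dict String String) (metric : String) : PySem.Dict String String :=
  match stats.get? metric with
  | some (f, l, c) =>
      if c ≥ 2 then
        trends.insert metric
          (if l > f then "improving" else if l < f then "declining" else "stable")
      else trends
  | none => trends

def analyze_wellness_trends_py_alt (wellness_data : List (List (String × Int))) (metrics : List String) : List (String × String) :=
  let stats := pvStats wellness_data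
  (metrics.foldl (pvBStep stats) PySem.Dict.empty).items

-- ===== PRECONDITION & SPEC =====
-- Each row ports a Python dict, which cannot hold duplicate keys; Pre_ states that shape
-- (no input A accepts as a list of dicts is excluded).
def Pre_analyze_wellness_trends_py (wellness_data : List (List (String × Int))) (metrics : List String) : Prop :=
  ∀ row ∈ wellness_data, (row.map Prod.fst).Nodup
instance (wellness_data : List (List (String × Int))) (metrics : List String) : Decidable (Pre_analyze_wellness_trends_py wellness_data metrics) := by unfold Pre_analyze_wellness_trends_py; infer_instance

def pvWitness_analyze_wellness_trends_py : (List (List (String × Int))) × List String :=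
  ([[("sleep", 6), ("mood", 3)], [("sleep", 8)]], ["sleep", "mood", "steps"])

def Spec_analyze_wellness_trends_py (wellness_data : List (List (String × Int))) (metrics : List String) (out : List (String × String)) : Prop := out = analyze_wellness_trends_py_alt wellness_data metrics
instance (wellness_data : List (List (String × Int))) (metrics : List String) (out : List (String × String)) : Decidable (Spec_analyze_wellness_trends_py wellness_data metrics out) := by unfold Spec_analyze_wellness_trends_py; infer_instance

-- ===== CLAIM (what is proved, stated in full; the proofs are below) =====
def Claim_equal_analyze_wellness_trends_py : Prop := ∀ (wellness_data : List (List (String × Int))) (metrics : List String), Dom_analyze_wellness_trends_py wellness_data metrics → Pre_analyze_wellness_trends_py wellness_data metrics → Spec_analyze_wellness_trends_py wellness_data metrics (analyze_wellness_trends_py wellness_data metrics)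

-- ===== LEMMAS AND PROOFS =====

-- abstract update 'g' describing how a stream of values for one metric evolves the stats entry
def pvG (o : Option (Int × Int × Int)) (vs : List Int) : Option (Int × Int × Int) :=
  match vs with
  | [] => o
  | v :: vs =>
    match o with
    | some (f, _, c) => pvG (some (f, v, c + 1)) vs
    | none => pvG (some (v, v, 1)) vs

-- the values A collects for metric m
def pvVals (wellness_data : List (List (String × Int))) (m : String) : List Int :=
  (wellness_data.filter (fun data => (PySem.Dict.mk data).contains m)).map
    (fun data => (PySem.Dict.mk data).getD m 0)

lemma pvBRow_get_skip (m : String) (data : List (String × Int)) (st : PySem.Dict String (Int × Int × Int))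
    (h : m ∉ data.map Prod.fst) : (pvBRow st data).get? m = st.get? m := by
  induction data generalizing st with
  | nil => rfl
  | cons p rest ih =>
    simp only [List.map_cons, List.mem_cons, not_or] at h
    simp only [pvBRow, List.foldl_cons] at *
    rw [ih _ h.2]
    cases hg : st.get? p.1 with
    | none => simp [PySem.Dict.get?_insert_of_ne _ _ h.1]
    | some t =>
      obtain ⟨f, l, c⟩ := t
      simp [PySem.Dict.get?_insert_of_ne _ _ h.1]

lemma pvBRow_get (m : String) (data : List (String × Int)) (st : PySem.Dict String (Int × Int × Int))
    (hnd : (data.map Prod.fst).Nodup) :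
    (pvBRow st data).get? m =
      if (PySem.Dict.mk data).contains m then
        (match st.get? m with
         | some (f, _, c) => some (f, (PySem.Dict.mk data).getD m 0, c + 1)
         | none => some ((PySem.Dict.mk data).getD m 0, (PySem.Dict.mk data).getD m 0, 1))
      else st.get? m := by
  induction data generalizing st with
  | nil => simp [pvBRow, PySem.Dict.contains_mk]
  | cons p rest ih =>
    simp only [List.map_cons, List.nodup_cons] at hnd
    by_cases hm : p.1 = m
    · subst hm
      have hskip : p.1 ∉ rest.map Prod.fst := hnd.1
      simp only [pvBRow, List.foldl_cons]
      have : (pvBRow (match st.get? p.1 with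
          | some (f, _, c) => st.insert p.1 (f, p.2, c + 1)
          | none => st.insert p.1 (p.2, p.2, 1)) rest).get? p.1 =
          (match st.get? p.1 with
          | some (f, _, c) => st.insert p.1 (f, p.2, c + 1)
          | none => st.insert p.1 (p.2, p.2, 1)).get? p.1 := by
        cases hg : st.get? p.1 with
        | none => exact pvBRow_get_skip _ _ _ hskip
        | some t => obtain ⟨f, l, c⟩ := t; exact pvBRow_get_skip _ _ _ hskip
      rw [show (List.foldl (fun st p =>
          match st.get? p.1 with
          | some (f, _, c) => st.insert p.1 (f, p.2, c + 1)
          | none => st.insert p.1 (p.2, p.2, 1)) (match st.get? p.1 with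
          | some (f, _, c) => st.insert p.1 (f, p.2, c + 1)
          | none => st.insert p.1 (p.2, p.2, 1)) rest) = pvBRow (match st.get? p.1 with
          | some (f, _, c) => st.insert p.1 (f, p.2, c + 1)
          | none => st.insert p.1 (p.2, p.2, 1)) rest from rfl, this]
      have hget : (PySem.Dict.mk (p :: rest)).getD p.1 0 = p.2 := by
        rw [PySem.Dict.getD_eq_get?_getD, PySem.Dict.get?_mk_cons]; simp
      have hcon : (PySem.Dict.mk (p :: rest)).contains p.1 = true := by
        simp [PySem.Dict.contains_mk]
      rw [hcon, hget]
      cases hg : st.get? p.1 with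
      | none => simp [PySem.Dict.get?_insert_self]
      | some t => obtain ⟨f, l, c⟩ := t; simp [PySem.Dict.get?_insert_self]
    · simp only [pvBRow, List.foldl_cons]
      have step : (match st.get? p.1 with
          | some (f, _, c) => st.insert p.1 (f, p.2, c + 1)
          | none => st.insert p.1 (p.2, p.2, 1)).get? m = st.get? m := by
        cases hg : st.get? p.1 with
        | none => exact PySem.Dict.get?_insert_of_ne _ _ (fun h => hm h.symm)
        | some t => obtain ⟨f, l, c⟩ := t; exact PySem.Dict.get?_insert_of_ne _ _ (fun h => hm h.symm)
      have hcon : (PySem.Dict.mk (p :: rest)).contains m = (PySem.Dict.mk rest).contains m := by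
        simp [PySem.Dict.contains_mk, hm]
      have hget : (PySem.Dict.mk (p :: rest)).getD m 0 = (PySem.Dict.mk rest).getD m 0 := by
        rw [PySem.Dict.getD_eq_get?_getD, PySem.Dict.get?_mk_cons,
          PySem.Dict.getD_eq_get?_getD]
        simp [hm]
      rw [show (List.foldl (fun st p =>
          match st.get? p.1 with
          | some (f, _, c) => st.insert p.1 (f, p.2, c + 1)
          | none => st.insert p.1 (p.2, p.2, 1)) (match st.get? p.1 with
          | some (f, _, c) => st.insert p.1 (f, p.2, c + 1)
          | none => st.insert p.1 (p.2, p.2, 1)) rest) = pvBRow (match st.get? p.1 with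
          | some (f, _, c) => st.insert p.1 (f, p.2, c + 1)
          | none => st.insert p.1 (p.2, p.2, 1)) rest from rfl]
      rw [ih _ hnd.2, step, hcon, hget]

lemma pvStats_get (wellness_data : List (List (String × Int))) (m : String)
    (hnd : ∀ row ∈ wellness_data, (row.map Prod.fst).Nodup) (st : PySem.Dict String (Int × Int × Int)) :
    (wellness_data.foldl pvBRow st).get? m = pvG (st.get? m) (pvVals wellness_data m) := by
  induction wellness_data generalizing st with
  | nil => rfl
  | cons row rest ih =>
    have hrow := hnd row (by simp)
    have hrest : ∀ r ∈ rest, (r.map Prod.fst).Nodup := fun r hr => hnd r (by simp [hr])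
    simp only [List.foldl_cons]
    rw [ih hrest]
    by_cases hc : (PySem.Dict.mk row).contains m
    · have hc' : (row.any fun p => p.1 == m) = true := hc
      have hv : pvVals (row :: rest) m = (PySem.Dict.mk row).getD m 0 :: pvVals rest m := by
        simp [pvVals, hc']
      rw [hv, pvBRow_get m row st hrow, if_pos hc]
      cases hg : st.get? m with
      | none => simp [pvG]
      | some t => obtain ⟨f, l, c⟩ := t; simp [pvG]
    · have hc' : ¬ ((row.any fun p => p.1 == m) = true) := hc
      have hv : pvVals (row :: rest) m = pvVals rest m := by
        simp [pvVals, hc']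
      rw [hv, pvBRow_get m row st hrow, if_neg hc]

lemma pvG_some (vs : List Int) (f l : Int) (c : Int) :
    pvG (some (f, l, c)) vs = some (f, vs.getLastD l, c + vs.length) := by
  induction vs generalizing l c with
  | nil => simp [pvG]
  | cons v vs ih =>
    simp only [pvG, ih]
    have h1 : (v :: vs).getLastD l = vs.getLastD v := by cases vs <;> simp [List.getLastD]
    have h2 : c + 1 + (vs.length : Int) = c + ((v :: vs).length : Int) := by
      push_cast [List.length_cons]; ring
    rw [h1, h2]

lemma pvStep_eq (wellness_data : List (List (String × Int)))
    (hnd : ∀ row ∈ wellness_data, (row.map Prod.fst).Nodup)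
    (trends : PySem.Dict String String) (m : String) :
    pvAStep wellness_data trends m = pvBStep (pvStats wellness_data) trends m := by
  have hst : (pvStats wellness_data).get? m = pvG none (pvVals wellness_data m) := by
    have := pvStats_get wellness_data m hnd PySem.Dict.empty
    simpa [pvStats, PySem.Dict.get?_empty] using this
  unfold pvAStep pvBStep
  rw [hst]
  cases hv : pvVals wellness_data m with
  | nil =>
    have hvals : ((wellness_data.filter (fun data => (PySem.Dict.mk data).contains m)).map
        (fun data => (PySem.Dict.mk data).getD m 0)) = [] := hv
    simp only [hvals, pvG, List.length_nil]
    norm_num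
  | cons v vs =>
    have hvals : ((wellness_data.filter (fun data => (PySem.Dict.mk data).contains m)).map
        (fun data => (PySem.Dict.mk data).getD m 0)) = v :: vs := hv
    simp only [pvG, pvG_some, hvals]
    have hne : (v :: vs : List Int) ≠ [] := by simp
    by_cases hlen : (v :: vs : List Int).length ≥ 2
    · rw [if_pos hlen]
      have hc : (1 : Int) + vs.length ≥ 2 := by
        simp only [List.length_cons] at hlen; omega
      rw [if_pos hc]
      have hfirst : PySem.List.pyGetD (v :: vs) 0 0 = v := PySem.List.pyGetD_zero_cons v vs 0
      have hlast : PySem.List.pyGetD (v :: vs) (-1) 0 = vs.getLastD v := by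
        rw [PySem.List.pyGetD_neg_one (xs := v::vs) (d := 0) hne]
        cases vs <;> simp [List.getLastD, List.getLast]
      rw [hfirst, hlast]
      split_ifs <;> rfl
    · rw [if_neg hlen]
      have hc : ¬ ((1 : Int) + vs.length ≥ 2) := by
        simp only [List.length_cons] at hlen; omega
      rw [if_neg hc]

-- ===== VERDICT (by name: the statement is the Claim_ definition above) =====
theorem analyze_wellness_trends_py_spec : Claim_equal_analyze_wellness_trends_py := by
  intro wellness_data metrics _ hpre
  unfold Spec_analyze_wellness_trends_py analyze_wellness_trends_py analyze_wellness_trends_py_alt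
  have hstep : pvAStep wellness_data = pvBStep (pvStats wellness_data) := by
    funext t m; exact pvStep_eq wellness_data hpre t m
  rw [hstep]
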